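-- pv_equiv track=rewrite | github.com/MinhCreator/python_dev | python-project/de_thay_nam/cap_so_anh_em.py | couple_prime
-- ===== SOURCE A (Python) =====
-- def sievep1(n):
--     prime = [True] * (n + 1)
--     prime_start = 2
--
--     while prime_start * prime_start <= n:
--         if prime[prime_start] == True:
--
--             for i in range(prime_start * prime_start, n + 1, prime_start):
--                 prime[i] = False
--
--         prime_start += 1
--
--     prime_s = []
--
--     for primes in range(2, n + 1):
--         if prime[primes] == True:
--             prime_s.append(primes)
--     return prime_s
--
-- def couple_prime(n: int, k: int):
--
--     prime = sievep1(n)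
--     count = 0
--
--     for i in range(len(prime)):
--
--         for j in range(i + 1, len(prime)):
--
--             if prime[j] - prime[i] == k or prime[i] - prime[j] == k:
--                 count += 1
--
--     return count
-- ===== SOURCE B (Python) =====
-- def couple_prime(n: int, k: int):
--     # Different algorithm: no sieve, no pair scan.  A pair of primes (p, q),
--     # p < q <= n, has |q - p| == k iff q == p + |k| (and k != 0), so count
--     # p in 2..n with p + |k| <= n such that both p and p + |k| pass a
--     # trial-division primality test.
--     if k == 0:
--         return 0
--     d = abs(k)
--     count = 0
--     for p in range(2, n + 1):
--         if p + d <= n and _is_prime(p) and _is_prime(p + d):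
--             count += 1
--     return count
--
--
-- def _is_prime(m: int) -> bool:
--     if m < 2:
--         return False
--     f = 2
--     while f * f <= m:
--         if m % f == 0:
--             return False
--         f += 1
--     return True
-- ===== Notes on version B (the rewrite author's own statement) =====
-- stated objective: faster
-- what changed: B removes both the sieve array and A's quadratic scan over all index pairs: since the prime list is strictly increasing, a pair at distance |k| exists for p exactly when p+|k| is also prime, so B counts p in 2..n with p+|k|<=n such that p and p+|k| both pass a trial-division primality test (k=0 yields no pairs).
import Mathlib
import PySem

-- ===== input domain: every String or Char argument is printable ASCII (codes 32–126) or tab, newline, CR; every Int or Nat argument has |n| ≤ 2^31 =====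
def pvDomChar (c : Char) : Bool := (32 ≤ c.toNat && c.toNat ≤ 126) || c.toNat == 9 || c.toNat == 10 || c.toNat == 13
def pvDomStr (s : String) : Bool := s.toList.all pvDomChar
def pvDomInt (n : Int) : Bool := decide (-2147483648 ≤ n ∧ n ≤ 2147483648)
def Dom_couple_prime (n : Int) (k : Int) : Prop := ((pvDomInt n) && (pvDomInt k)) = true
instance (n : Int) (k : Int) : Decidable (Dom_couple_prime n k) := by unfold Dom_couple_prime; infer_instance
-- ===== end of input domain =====

-- B drops both the sieve and A's quadratic pair scan: it counts p in 2..n with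
-- p + |k| <= n such that p and p + |k| both pass a trial-division primality test
-- (objective: faster; a pair of distinct primes is at distance |k| iff the larger
-- one is the smaller plus |k|).


-- ===== PORT A =====
-- the 'while prime_start * prime_start <= n' loop of sievep1
def sieveLoop (n : Int) (prime : List Bool) (s : Int) : List Bool :=
  if h : s * s ≤ n then
    sieveLoop n
      (if PySem.List.pyGetD prime s false = true then
        (PySem.List.pyRange (s * s) (n + 1) s).foldl
          (fun acc i => PySem.List.pySetD acc i false) prime
       else prime)
      (s + 1)
  else prime
termination_by (n + 1 - s).toNat
decreasing_by
  have hs : s ≤ s * s := by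
    by_cases h0 : s ≤ 0
    · exact le_trans h0 (mul_self_nonneg s)
    · nlinarith [lt_of_not_ge h0]
  omega

def sievep1 (n : Int) : List Int :=
  let prime := sieveLoop n (List.replicate (n + 1).toNat true) 2
  (PySem.List.pyRange 2 (n + 1)).foldl
    (fun acc p => if PySem.List.pyGetD prime p false = true then acc ++ [p] else acc) []

def couple_prime (n : Int) (k : Int) : Int :=
  let prime := sievep1 n
  (PySem.List.pyRange 0 (PySem.List.len prime)).foldl
    (fun count i =>
      (PySem.List.pyRange (i + 1) (PySem.List.len prime)).foldl
        (fun count j =>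
          if PySem.List.pyGetD prime j 0 - PySem.List.pyGetD prime i 0 = k ∨
             PySem.List.pyGetD prime i 0 - PySem.List.pyGetD prime j 0 = k
          then count + 1 else count)
        count)
    0

-- ===== PORT B =====
-- the 'while f * f <= m' loop of _is_prime
def tdLoop (m : Int) (f : Int) : Bool :=
  if h : f * f ≤ m then
    if PySem.Int.mod m f = 0 then false else tdLoop m (f + 1)
  else true
termination_by (m + 1 - f).toNat
decreasing_by
  have hf : f ≤ f * f := by
    by_cases h0 : f ≤ 0
    · exact le_trans h0 (mul_self_nonneg f)
    · nlinarith [lt_of_not_ge h0]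
  omega

def isPrimeTD (m : Int) : Bool :=
  if m < 2 then false else tdLoop m 2

def couple_prime_alt (n : Int) (k : Int) : Int :=
  if k = 0 then 0
  else
    let d := |k|
    (PySem.List.pyRange 2 (n + 1)).foldl
      (fun count p =>
        if p + d ≤ n ∧ isPrimeTD p = true ∧ isPrimeTD (p + d) = true
        then count + 1 else count)
      0

-- ===== PRECONDITION & SPEC =====
def Spec_couple_prime (n : Int) (k : Int) (out : Int) : Prop := out = couple_prime_alt n k
instance (n : Int) (k : Int) (out : Int) : Decidable (Spec_couple_prime n k out) := by unfold Spec_couple_prime; infer_instance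

-- ===== CLAIM (what is proved, stated in full; the proofs are below) =====
def Claim_equal_couple_prime : Prop := ∀ (n : Int) (k : Int), Dom_couple_prime n k → Spec_couple_prime n k (couple_prime n k)

-- ===== LEMMAS AND PROOFS =====

-- counting loop with a Prop test, reduced to PySem.List.foldl_count_if
theorem foldl_count_ite {α : Type} (p : α → Prop) [DecidablePred p] (l : List α) (a : Int) :
    l.foldl (fun acc x => if p x then acc + 1 else acc) a
      = a + (l.countP (fun x => decide (p x)) : Int) := by
  simpa using PySem.List.foldl_count_if (fun x => decide (p x)) l a

-- the list produced by sievep1 is strictly increasing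
theorem sievep1_sorted (n : Int) : (sievep1 n).Pairwise (· < ·) := by
  unfold sievep1
  rw [PySem.List.foldl_append_if_eq_filter]
  exact List.Pairwise.sublist List.filter_sublist (PySem.List.pairwise_lt_pyRange_one 2 (n + 1))

-- the structural sum Σ_{a < |M|} countP (cond M[a]) (drop (a+1) M)
def pairSum (k : Int) (M : List Int) : Nat :=
  ((List.range M.length).map (fun a =>
    (M.drop (a + 1)).countP
      (fun y => decide (y - M.getD a 0 = k ∨ M.getD a 0 - y = k)))).sum

theorem pairSum_cons (k : Int) (x : Int) (xs : List Int) :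
    pairSum k (x :: xs)
      = xs.countP (fun y => decide (y - x = k ∨ x - y = k)) + pairSum k xs := by
  unfold pairSum
  rw [List.length_cons, List.range_succ_eq_map, List.map_cons, List.map_map, List.sum_cons]
  rfl

-- for a strictly increasing list, the pair sum is the one-pass count
theorem pairSum_eq (k : Int) (M : List Int) (hM : M.Pairwise (· < ·)) :
    pairSum k M = if k = 0 then 0 else M.countP (fun p => decide (p + |k| ∈ M)) := by
  induction M with
  | nil => unfold pairSum; simp
  | cons x xs ih =>
    have hx : ∀ y ∈ xs, x < y := fun y hy => (List.pairwise_cons.mp hM).1 y hy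
    have hxs : xs.Pairwise (· < ·) := (List.pairwise_cons.mp hM).2
    have hnd : xs.Nodup := hxs.imp ne_of_lt
    rw [pairSum_cons, ih hxs]
    by_cases hk : k = 0
    · subst hk
      have h0 : xs.countP (fun y => decide (y - x = 0 ∨ x - y = 0)) = 0 :=
        List.countP_eq_zero.mpr (by
          intro y hy
          have hxy := hx y hy
          simp only [decide_eq_true_eq, not_or]
          omega)
      rw [h0]
      norm_num
    · have hd : 0 < |k| := abs_pos.mpr hk
      rw [if_neg hk, if_neg hk]
      have hhead : xs.countP (fun y => decide (y - x = k ∨ x - y = k))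
          = if x + |k| ∈ xs then 1 else 0 := by
        have hcg : xs.countP (fun y => decide (y - x = k ∨ x - y = k))
            = xs.countP (fun y => y == x + |k|) := by
          apply List.countP_congr
          intro y hy
          have := hx y hy
          simp only [decide_eq_true_eq, beq_iff_eq]
          rcases abs_cases k with ⟨h1, h2⟩ | ⟨h1, h2⟩ <;> constructor <;> intro h <;> omega
        rw [hcg]
        by_cases hm : x + |k| ∈ xs
        · rw [if_pos hm]
          simpa [List.count] using List.count_eq_one_of_mem hnd hm
        · rw [if_neg hm]
          simpa [List.count] using List.count_eq_zero_of_not_mem hm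
      have hrhs : (x :: xs).countP (fun p => decide (p + |k| ∈ x :: xs))
          = xs.countP (fun p => decide (p + |k| ∈ xs)) + (if x + |k| ∈ xs then 1 else 0) := by
        rw [List.countP_cons]
        congr 1
        · apply List.countP_congr
          intro p hp
          have hxp : x < p := hx p hp
          simp only [decide_eq_true_eq, List.mem_cons]
          constructor
          · rintro (h | h)
            · exfalso; omega
            · exact h
          · exact fun h => Or.inr h
        · simp only [decide_eq_true_eq, List.mem_cons]
          have : ¬ (x + |k| = x) := by omega
          by_cases hm : x + |k| ∈ xs
          · rw [if_pos (Or.inr hm), if_pos hm]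
          · rw [if_neg (by tauto), if_neg hm]
      rw [hrhs, hhead, Nat.add_comm]

-- A's nested index loops compute pairSum
theorem couple_loops_eq_pairSum (k : Int) (L : List Int) :
    (PySem.List.pyRange 0 (PySem.List.len L)).foldl
      (fun count i =>
        (PySem.List.pyRange (i + 1) (PySem.List.len L)).foldl
          (fun count j =>
            if PySem.List.pyGetD L j 0 - PySem.List.pyGetD L i 0 = k ∨
               PySem.List.pyGetD L i 0 - PySem.List.pyGetD L j 0 = k
            then count + 1 else count)
          count)
      0 = (pairSum k L : Int) := by
  have hinner : ∀ (i c : Int), 0 ≤ i →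
      (PySem.List.pyRange (i + 1) (PySem.List.len L)).foldl
        (fun count j =>
          if PySem.List.pyGetD L j 0 - PySem.List.pyGetD L i 0 = k ∨
             PySem.List.pyGetD L i 0 - PySem.List.pyGetD L j 0 = k
          then count + 1 else count) c
      = c + ((L.drop (i + 1).toNat).countP
          (fun y => decide (y - PySem.List.pyGetD L i 0 = k ∨ PySem.List.pyGetD L i 0 - y = k)) : Int) := by
    intro i c hi
    rw [foldl_count_ite (fun j => PySem.List.pyGetD L j 0 - PySem.List.pyGetD L i 0 = k ∨
          PySem.List.pyGetD L i 0 - PySem.List.pyGetD L j 0 = k)]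
    congr 1
    rw [← PySem.List.map_pyGetD_pyRange L 0 (by omega : (0:Int) ≤ i + 1), List.countP_map]
    rfl
  have houter : (PySem.List.pyRange 0 (PySem.List.len L)).foldl
      (fun count i =>
        (PySem.List.pyRange (i + 1) (PySem.List.len L)).foldl
          (fun count j =>
            if PySem.List.pyGetD L j 0 - PySem.List.pyGetD L i 0 = k ∨
               PySem.List.pyGetD L i 0 - PySem.List.pyGetD L j 0 = k
            then count + 1 else count)
          count)
      0
      = (PySem.List.pyRange 0 (PySem.List.len L)).foldl
        (fun count i => count + ((L.drop (i + 1).toNat).countP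
          (fun y => decide (y - PySem.List.pyGetD L i 0 = k ∨ PySem.List.pyGetD L i 0 - y = k)) : Int))
        0 := by
    apply PySem.List.foldl_congr_mem
    intro c i hi
    have h0 : 0 ≤ i := ((PySem.List.mem_pyRange_one).mp hi).1
    exact hinner i c h0
  rw [houter, PySem.List.foldl_add, Int.zero_add,
      PySem.List.len_eq, PySem.List.pyRange_zero_natCast, List.map_map]
  unfold pairSum
  rw [Nat.cast_list_sum, List.map_map]
  congr 1
  apply List.map_congr_left
  intro a ha
  simp only [Function.comp_apply]
  have ha' : ((a : Int) + 1).toNat = a + 1 := by omega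
  rw [ha', PySem.List.pyGetD_natCast]

-- ---------- trial-division correctness (B side) ----------

theorem tdLoop_eq_true_iff (m : Int) (f : Int) (hf : 1 ≤ f) :
    (tdLoop m f = true ↔ ∀ e : Int, f ≤ e → e * e ≤ m → ¬ e ∣ m) := by
  fun_induction tdLoop m f with
  | case1 f h hmod =>
    simp only [Bool.false_eq_true, false_iff]
    push Not
    exact ⟨f, le_refl f, h, (PySem.Int.mod_eq_zero_iff_dvd m f).mp hmod⟩
  | case2 f h hmod ih =>
    rw [ih (by omega)]
    constructor
    · intro hall e hfe hee
      rcases eq_or_lt_of_le hfe with heq | hlt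
      · exact fun hd => hmod ((PySem.Int.mod_eq_zero_iff_dvd m f).mpr (heq ▸ hd))
      · exact hall e (by omega) hee
    · exact fun hall e hfe hee => hall e (by omega) hee
  | case3 f h =>
    simp only [true_iff]
    intro e hfe hee hd
    have : f * f ≤ e * e := by nlinarith
    omega

theorem isPrimeTD_iff (m : Int) : isPrimeTD m = true ↔ 2 ≤ m ∧ m.toNat.Prime := by
  unfold isPrimeTD
  by_cases hm : m < 2
  · simp only [if_pos hm, Bool.false_eq_true, false_iff]
    intro ⟨h, _⟩; omega
  · push Not at hm
    rw [if_neg (by omega), tdLoop_eq_true_iff m 2 (by omega)]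
    constructor
    · intro hall
      refine ⟨hm, ?_⟩
      by_contra hnp
      set q := m.toNat.minFac with hq
      have hm1 : m.toNat ≠ 1 := by omega
      have hqp : q.Prime := Nat.minFac_prime hm1
      have hq2 : 2 ≤ q := hqp.two_le
      have hqd : q ∣ m.toNat := Nat.minFac_dvd _
      have hqq : q * q ≤ m.toNat := by
        have := Nat.minFac_sq_le_self (by omega : 0 < m.toNat) hnp
        nlinarith [this, sq q]
      refine hall (q : Int) (by exact_mod_cast hq2) ?_ ?_
      · have : ((q * q : Nat) : Int) ≤ ((m.toNat : Nat) : Int) := by exact_mod_cast hqq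
        push_cast at this
        omega
      · have : (q : Int) ∣ (m.toNat : Int) := Int.natCast_dvd_natCast.mpr hqd
        rwa [Int.toNat_of_nonneg (by omega)] at this
    · rintro ⟨-, hp⟩ e he2 hee hd
      have he0 : 0 ≤ e := by omega
      have hd' : e.toNat ∣ m.toNat := by
        have : ((e.toNat : Nat) : Int) ∣ ((m.toNat : Nat) : Int) := by
          rw [Int.toNat_of_nonneg he0, Int.toNat_of_nonneg (by omega)]
          exact hd
        exact_mod_cast this
      rcases (Nat.Prime.eq_one_or_self_of_dvd hp e.toNat hd') with h1 | h1
      · omega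
      · have : e = m := by omega
        subst this
        nlinarith


-- ---------- sieve correctness (A side) ----------

theorem sievep1_eq_filter (n : Int) :
    sievep1 n = (PySem.List.pyRange 2 (n + 1)).filter
      (fun p => PySem.List.pyGetD (sieveLoop n (List.replicate (n + 1).toNat true) 2) p false) := by
  unfold sievep1
  rw [PySem.List.foldl_append_if_eq_filter, List.nil_append]

theorem getD_foldl_setFalse (idxs : List Int) (arr : List Bool) (m : Int)
    (hm : 0 ≤ m)
    (h : ∀ i ∈ idxs, 0 ≤ i ∧ i < (arr.length : Int)) :
    PySem.List.pyGetD (idxs.foldl (fun a i => PySem.List.pySetD a i false) arr) m false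
      = if m ∈ idxs then false else PySem.List.pyGetD arr m false := by
  induction idxs generalizing arr with
  | nil => simp
  | cons a t ih =>
    obtain ⟨ha0, halen⟩ := h a List.mem_cons_self
    rw [List.foldl_cons, ih (PySem.List.pySetD arr a false) (fun i hi => by
      have := h i (List.mem_cons_of_mem _ hi)
      simpa [PySem.List.length_pySetD] using this)]
    have hget : PySem.List.pyGetD (PySem.List.pySetD arr a false) m false
        = if m = a then false else PySem.List.pyGetD arr m false := by
      have h1 : ((a.toNat : Nat) : Int) = a := Int.toNat_of_nonneg ha0
      have h2 : ((m.toNat : Nat) : Int) = m := Int.toNat_of_nonneg hm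
      rw [← h1, ← h2, PySem.List.pyGetD_pySetD_natCast arr a.toNat m.toNat false false (by omega),
        h1, h2]
      by_cases he : m = a
      · rw [if_pos (by omega), if_pos he]
      · rw [if_neg (by omega), if_neg he]
    rw [hget]
    by_cases h1 : m ∈ t
    · simp [h1]
    · by_cases h2 : m = a <;> simp [h1, h2]

theorem length_foldl_setFalse (idxs : List Int) (arr : List Bool) :
    (idxs.foldl (fun a i => PySem.List.pySetD a i false) arr).length = arr.length := by
  induction idxs generalizing arr with
  | nil => rfl
  | cons a t ih => rw [List.foldl_cons, ih, PySem.List.length_pySetD]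

-- indices marked in one pass are in range

theorem pass_idx_range (n s : Int) (hs : 2 ≤ s) (i : Int)
    (hi : i ∈ PySem.List.pyRange (s * s) (n + 1) s) : 0 ≤ i ∧ i < n + 1 := by
  have := (PySem.List.mem_pyRange_iff_of_pos (by omega : (0:Int) < s) i).mp hi
  have : s * s ≤ i ∧ i < n + 1 := ⟨this.1, this.2.1⟩
  constructor
  · nlinarith [this.1]
  · exact this.2

theorem mem_pass_iff (n s : Int) (hs : 2 ≤ s) (i : Int) :
    i ∈ PySem.List.pyRange (s * s) (n + 1) s ↔ s * s ≤ i ∧ i < n + 1 ∧ s ∣ i := by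
  rw [PySem.List.mem_pyRange_iff_of_pos (by omega : (0:Int) < s) i]
  have hss : s ∣ s * s := ⟨s, rfl⟩
  constructor
  · rintro ⟨h1, h2, h3⟩
    exact ⟨h1, h2, by simpa using dvd_add h3 hss⟩
  · rintro ⟨h1, h2, h3⟩
    exact ⟨h1, h2, dvd_sub h3 hss⟩

theorem sieveLoop_false (n m : Int) (hm : 0 ≤ m) : ∀ (s : Int) (arr : List Bool),
    2 ≤ s →
    arr.length = (n + 1).toNat →
    PySem.List.pyGetD arr m false = false →
    PySem.List.pyGetD (sieveLoop n arr s) m false = false := by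
  intro s arr hs hlen hfalse
  fun_induction sieveLoop n arr s with
  | case1 arr s h ih =>
    apply ih (by omega)
    · split
      · rw [length_foldl_setFalse]; exact hlen
      · exact hlen
    · split
      · rw [getD_foldl_setFalse _ _ _ hm (fun i hi => by
          have hr := pass_idx_range n s hs i hi
          constructor
          · exact hr.1
          · have : 0 ≤ n := by nlinarith
            omega)]
        split <;> [rfl; exact hfalse]
      · exact hfalse
  | case2 arr s h => exact hfalse

theorem sieveLoop_prime (n m : Int) (hm2 : 2 ≤ m) (hp : m.toNat.Prime) :
    ∀ (s : Int) (arr : List Bool),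
    2 ≤ s →
    arr.length = (n + 1).toNat →
    PySem.List.pyGetD arr m false = true →
    PySem.List.pyGetD (sieveLoop n arr s) m false = true := by
  intro s arr hs hlen htrue
  fun_induction sieveLoop n arr s with
  | case1 arr s h ih =>
    apply ih (by omega)
    · split
      · rw [length_foldl_setFalse]; exact hlen
      · exact hlen
    · split
      · rw [getD_foldl_setFalse _ _ _ (by omega) (fun i hi => by
          have hr := pass_idx_range n s hs i hi
          constructor
          · exact hr.1
          · have : 0 ≤ n := by nlinarith
            omega)]
        rw [if_neg, htrue]
        intro hmem
        obtain ⟨hss, -, hdvd⟩ := (mem_pass_iff n s hs m).mp hmem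
        have hd' : s.toNat ∣ m.toNat := by
          have : ((s.toNat : Nat) : Int) ∣ ((m.toNat : Nat) : Int) := by
            rw [Int.toNat_of_nonneg (by omega : (0:Int) ≤ s),
                Int.toNat_of_nonneg (by omega : (0:Int) ≤ m)]
            exact hdvd
          exact_mod_cast this
        rcases hp.eq_one_or_self_of_dvd s.toNat hd' with h1 | h1
        · omega
        · have : s = m := by omega
          nlinarith
      · exact htrue
  | case2 arr s h => exact htrue

theorem sieveLoop_composite (n m : Int) (hm2 : 2 ≤ m) (hmn : m ≤ n)
    (hnp : ¬ m.toNat.Prime) :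
    ∀ (s : Int) (arr : List Bool),
    arr.length = (n + 1).toNat →
    2 ≤ s → s ≤ (m.toNat.minFac : Int) →
    PySem.List.pyGetD arr (m.toNat.minFac : Int) false = true →
    PySem.List.pyGetD (sieveLoop n arr s) m false = false := by
  have hm1 : m.toNat ≠ 1 := by omega
  have hqp : (m.toNat.minFac).Prime := Nat.minFac_prime hm1
  have hq2 : 2 ≤ m.toNat.minFac := hqp.two_le
  have hqd : m.toNat.minFac ∣ m.toNat := Nat.minFac_dvd _
  have hqq : m.toNat.minFac * m.toNat.minFac ≤ m.toNat := by
    have := Nat.minFac_sq_le_self (by omega : 0 < m.toNat) hnp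
    nlinarith [this, sq m.toNat.minFac]
  have hq2' : (2:Int) ≤ (m.toNat.minFac : Int) := by exact_mod_cast hq2
  have hqdvd : (m.toNat.minFac : Int) ∣ m := by
    have : ((m.toNat.minFac : Nat) : Int) ∣ ((m.toNat : Nat) : Int) :=
      Int.natCast_dvd_natCast.mpr hqd
    rwa [Int.toNat_of_nonneg (by omega : (0:Int) ≤ m)] at this
  have hqq' : (m.toNat.minFac : Int) * (m.toNat.minFac : Int) ≤ m := by
    have : ((m.toNat.minFac * m.toNat.minFac : Nat) : Int) ≤ ((m.toNat : Nat) : Int) := by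
      exact_mod_cast hqq
    push_cast at this
    omega
  set q : Int := (m.toNat.minFac : Int) with hqdef
  intro s arr hlen hs hsq htrue
  fun_induction sieveLoop n arr s with
  | case1 arr s h ih =>
    rcases eq_or_lt_of_le hsq with heq | hlt
    · -- s = q: the pass runs (arr[q] = true) and marks m
      rw [← heq] at htrue
      rw [if_pos htrue]
      apply sieveLoop_false n m (by omega) (s + 1) _ (by omega)
      · rw [length_foldl_setFalse]; exact hlen
      · rw [getD_foldl_setFalse _ _ _ (by omega) (fun i hi => by
          have hr := pass_idx_range n s hs i hi
          constructor
          · exact hr.1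
          · omega)]
        rw [if_pos]
        rw [mem_pass_iff n s hs m]
        refine ⟨by rw [heq]; exact hqq', by omega, by rw [heq]; exact hqdvd⟩
    · -- s < q: the pass (if any) does not touch the prime index q
      apply ih
      · split
        · rw [length_foldl_setFalse]; exact hlen
        · exact hlen
      · omega
      · omega
      · split
        · rw [getD_foldl_setFalse _ _ _ (by omega) (fun i hi => by
            have hr := pass_idx_range n s hs i hi
            constructor
            · exact hr.1
            · omega)]
          rw [if_neg, htrue]
          intro hmem
          obtain ⟨hss, -, hdvd⟩ := (mem_pass_iff n s hs q).mp hmem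
          have hd' : s.toNat ∣ m.toNat.minFac := by
            have : ((s.toNat : Nat) : Int) ∣ ((m.toNat.minFac : Nat) : Int) := by
              rw [Int.toNat_of_nonneg (by omega : (0:Int) ≤ s)]
              exact hdvd
            exact_mod_cast this
          rcases hqp.eq_one_or_self_of_dvd s.toNat hd' with h1 | h1
          · omega
          · omega
        · exact htrue
  | case2 arr s h =>
    exfalso
    have : s * s ≤ q * q := by nlinarith
    omega

theorem mem_sievep1 (n p : Int) :
    p ∈ sievep1 n ↔ 2 ≤ p ∧ p ≤ n ∧ p.toNat.Prime := by
  unfold sievep1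
  rw [PySem.List.foldl_append_if_eq_filter, List.nil_append, List.mem_filter, PySem.List.mem_pyRange_one]
  constructor
  · rintro ⟨⟨h2, hn⟩, hg⟩
    refine ⟨h2, by omega, ?_⟩
    by_contra hnp
    have hq2 : 2 ≤ p.toNat.minFac := (Nat.minFac_prime (by omega : p.toNat ≠ 1)).two_le
    have hqle : p.toNat.minFac ≤ p.toNat := Nat.minFac_le (by omega)
    have := sieveLoop_composite n p h2 (by omega) hnp 2
      (List.replicate (n + 1).toNat true) (by simp) (by omega)
      (by exact_mod_cast hq2) ?_
    · rw [this] at hg; exact Bool.false_ne_true hg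
    · rw [show ((p.toNat.minFac : Nat) : Int) = (((p.toNat.minFac : Nat) : Nat) : Int) from rfl,
        PySem.List.pyGetD_natCast]
      simp only [List.getD, List.getElem?_replicate]
      rw [if_pos (by omega)]
      rfl
  · rintro ⟨h2, hn, hp⟩
    refine ⟨⟨h2, by omega⟩, ?_⟩
    apply sieveLoop_prime n p h2 hp 2 _ (by omega) (by simp)
    rw [show p = ((p.toNat : Nat) : Int) from (Int.toNat_of_nonneg (by omega)).symm,
      PySem.List.pyGetD_natCast]
    simp only [List.getD, List.getElem?_replicate]
    rw [if_pos (by omega)]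
    rfl

-- ---------- putting the two sides together ----------

theorem countP_sievep1_eq (n d : Int) :
    (sievep1 n).countP (fun p => decide (p + d ∈ sievep1 n))
      = (PySem.List.pyRange 2 (n + 1)).countP
          (fun p => decide (p + d ≤ n ∧ isPrimeTD p = true ∧ isPrimeTD (p + d) = true)) := by
  conv_lhs => rw [sievep1_eq_filter n]
  rw [List.countP_filter]
  apply List.countP_congr
  intro p hp
  obtain ⟨hp2, hpn⟩ := PySem.List.mem_pyRange_one.mp hp
  rw [Bool.eq_iff_iff]
  simp only [Bool.and_eq_true, decide_eq_true_eq, iff_true]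
  rw [← sievep1_eq_filter n]
  constructor
  · rintro ⟨hmem, hgp⟩
    have hpmem : p ∈ sievep1 n := by
      rw [sievep1_eq_filter n]
      exact List.mem_filter.mpr ⟨hp, hgp⟩
    obtain ⟨-, hpn', hpprime⟩ := (mem_sievep1 n p).mp hpmem
    obtain ⟨hq2, hqn, hqprime⟩ := (mem_sievep1 n _).mp hmem
    exact ⟨hqn, (isPrimeTD_iff p).mpr ⟨by omega, hpprime⟩,
      (isPrimeTD_iff _).mpr ⟨by omega, hqprime⟩⟩
  · rintro ⟨hle, hp1, hq1⟩
    obtain ⟨hp2', hpprime⟩ := (isPrimeTD_iff p).mp hp1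
    obtain ⟨hq2', hqprime⟩ := (isPrimeTD_iff _).mp hq1
    have hpmem : p ∈ sievep1 n := (mem_sievep1 n p).mpr ⟨by omega, by omega, hpprime⟩
    refine ⟨(mem_sievep1 n _).mpr ⟨by omega, hle, hqprime⟩, ?_⟩
    rw [sievep1_eq_filter n] at hpmem
    exact (List.mem_filter.mp hpmem).2

-- ===== VERDICT (by name: the statement is the Claim_ definition above) =====
theorem couple_prime_spec : Claim_equal_couple_prime := by
  intro n k _
  unfold Spec_couple_prime
  simp only [couple_prime, couple_prime_alt]
  rw [couple_loops_eq_pairSum k (sievep1 n), pairSum_eq k (sievep1 n) (sievep1_sorted n)]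
  by_cases hk : k = 0
  · rw [if_pos hk, if_pos hk]; rfl
  · rw [if_neg hk, if_neg hk,
      foldl_count_ite (fun p => p + |k| ≤ n ∧ isPrimeTD p = true ∧ isPrimeTD (p + |k|) = true),
      Int.zero_add, countP_sievep1_eq n |k|]
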